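-- pv_equiv track=rewrite | github.com/pypi-data/pypi-mirror-396 | packages/neverlib/neverlib-0.2.9-py3-none-any.whl/neverlib/vad/utils.py | vad2nad
-- ===== SOURCE A (Python) =====
-- def vad2nad(vad, total_length):
--     """根据语音时间戳, 提取噪声时间戳 (优化版)
--     Args:
--         vad: [{start:xxx, end:xxx}, ...]
--         total_length: 音频总长度（样本数）
--     Returns:
--         nad: [{start:xxx, end:xxx}, ...] 噪声时间戳列表
--     """
--     assert total_length > 0, "音频总长度必须大于0"
--     assert isinstance(vad, list), "vad必须是列表"
--
--     # 按开始时间排序, 确保VAD段是有序的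
--     vad_sorted = sorted(vad, key=lambda x: x['start'])
--
--     nad = []
--     last_end = 0
--     for segment in vad_sorted:
--         start = segment['start']
--         # 检查当前语音段和上一个语音段/音频开头的间隙
--         if start > last_end:
--             nad.append({'start': last_end, 'end': start})
--
--         # 使用max是为了处理可能重叠的VAD段
--         last_end = max(last_end, segment['end'])
--
--     # 检查最后一个语音段到音频结尾的间隙
--     if last_end < total_length:
--         nad.append({'start': last_end, 'end': total_length})
--
--     return nad
-- ===== SOURCE B (Python) =====
-- def vad2nad(vad, total_length):
--     """Noise complement via interval merging: first fuse the sorted VAD segments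
--     into disjoint speech intervals, then walk the merged intervals once to emit
--     the noise gaps (leading, in-between, trailing)."""
--     assert total_length > 0, "音频总长度必须大于0"
--     assert isinstance(vad, list), "vad必须是列表"
--
--     # Phase 1: merge overlapping/adjacent segments into disjoint intervals.
--     merged = []
--     for seg in sorted(vad, key=lambda x: x['start']):
--         if merged and seg['start'] <= merged[-1][1]:
--             merged[-1] = (merged[-1][0], max(merged[-1][1], seg['end']))
--         else:
--             merged.append((seg['start'], seg['end']))
--
--     # Phase 2: complement of the merged intervals inside [0, total_length).
--     nad = []
--     bound = 0
--     for s, e in merged: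
--         if s > bound:
--             nad.append({'start': bound, 'end': s})
--         bound = max(bound, e)
--     if bound < total_length:
--         nad.append({'start': bound, 'end': total_length})
--     return nad
-- ===== Notes on version B (the rewrite author's own statement) =====
-- stated objective: alternative
-- what changed: Replaces A's single sweep that emits gaps while tracking last_end with two phases: a stack-style merge of the sorted segments into disjoint speech intervals (extend the last merged interval or push a new one), then a separate complement pass over the merged intervals emitting leading/middle/trailing noise gaps.
import Mathlib
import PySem

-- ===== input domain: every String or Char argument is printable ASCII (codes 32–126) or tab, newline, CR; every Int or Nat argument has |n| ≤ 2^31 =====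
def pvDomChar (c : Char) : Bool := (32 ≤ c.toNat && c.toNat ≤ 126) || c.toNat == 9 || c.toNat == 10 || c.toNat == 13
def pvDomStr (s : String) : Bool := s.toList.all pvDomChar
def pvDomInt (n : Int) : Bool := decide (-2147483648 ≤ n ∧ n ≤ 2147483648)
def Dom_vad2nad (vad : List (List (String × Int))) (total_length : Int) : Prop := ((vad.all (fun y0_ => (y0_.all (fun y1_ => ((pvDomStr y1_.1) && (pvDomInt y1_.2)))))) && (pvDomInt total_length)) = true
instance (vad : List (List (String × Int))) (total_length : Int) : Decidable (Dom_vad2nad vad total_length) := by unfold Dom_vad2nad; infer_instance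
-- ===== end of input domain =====

-- B changes the decomposition: A emits noise gaps in one sweep with a running last_end;
-- B first merges the sorted segments into disjoint speech intervals (stack merge), then a
-- separate complement pass over the merged intervals emits the gaps.

-- ===== PORT A =====
-- segment['start'] / segment['end'] : first-match lookup; inputs with a missing key raise
-- KeyError in Python and are excluded by Pre_; getD 0 is only a placeholder outside Pre_.
def pvStart (seg : List (String × Int)) : Int := (seg.lookup "start").getD 0

def pvEnd (seg : List (String × Int)) : Int := (seg.lookup "end").getD 0

def aStep (st : List (List (String × Int)) × Int) (seg : List (String × Int)) :
    List (List (String × Int)) × Int :=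
  let start := pvStart seg
  let nad := if start > st.2 then st.1 ++ [[("start", st.2), ("end", start)]] else st.1
  (nad, max st.2 (pvEnd seg))

def vad2nad (vad : List (List (String × Int))) (total_length : Int) : List (List (String × Int)) :=
  let vad_sorted := PySem.List.sorted vad (fun seg => pvStart seg)
  let res := vad_sorted.foldl aStep ([], 0)
  if res.2 < total_length then res.1 ++ [[("start", res.2), ("end", total_length)]] else res.1

-- ===== PORT B =====
-- phase 1 step: extend the last merged interval in place, or push a new one
def mergeStep (M : List (Int × Int)) (seg : List (String × Int)) : List (Int × Int) :=
  match M.getLast? with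
  | some (s, e) =>
      if pvStart seg ≤ e then M.dropLast ++ [(s, max e (pvEnd seg))]
      else M ++ [(pvStart seg, pvEnd seg)]
  | none => M ++ [(pvStart seg, pvEnd seg)]

-- phase 2 step: emit a gap before a merged interval, advance the bound
def complStep (st : List (List (String × Int)) × Int) (p : Int × Int) :
    List (List (String × Int)) × Int :=
  (if p.1 > st.2 then st.1 ++ [[("start", st.2), ("end", p.1)]] else st.1, max st.2 p.2)

def vad2nad_alt (vad : List (List (String × Int))) (total_length : Int) : List (List (String × Int)) :=
  let merged := (PySem.List.sorted vad (fun seg => pvStart seg)).foldl mergeStep []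
  let res := merged.foldl complStep ([], 0)
  if res.2 < total_length then res.1 ++ [[("start", res.2), ("end", total_length)]] else res.1

-- ===== PRECONDITION & SPEC =====
-- Pre_ excludes exactly the inputs where A raises: total_length ≤ 0 (AssertionError) and
-- segments missing a 'start' or 'end' key (KeyError).
def Pre_vad2nad (vad : List (List (String × Int))) (total_length : Int) : Prop :=
  0 < total_length ∧ ∀ seg ∈ vad, (seg.lookup "start").isSome ∧ (seg.lookup "end").isSome

instance (vad : List (List (String × Int))) (total_length : Int) : Decidable (Pre_vad2nad vad total_length) := by unfold Pre_vad2nad; infer_instance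

def pvWitness_vad2nad : (List (List (String × Int))) × Int := ([[("start", 2), ("end", 3)]], 5)

def Spec_vad2nad (vad : List (List (String × Int))) (total_length : Int) (out : List (List (String × Int))) : Prop := out = vad2nad_alt vad total_length
instance (vad : List (List (String × Int))) (total_length : Int) (out : List (List (String × Int))) : Decidable (Spec_vad2nad vad total_length out) := by unfold Spec_vad2nad; infer_instance

-- ===== CLAIM (what is proved, stated in full; the proofs are below) =====
def Claim_equal_vad2nad : Prop := ∀ (vad : List (List (String × Int))) (total_length : Int), Dom_vad2nad vad total_length → Pre_vad2nad vad total_length → Spec_vad2nad vad total_length (vad2nad vad total_length)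

-- ===== LEMMAS AND PROOFS =====

-- proof-side recursions for A's sweep: the gap list and the final bound
def gaps (l : Int) : List (List (String × Int)) → List (List (String × Int))
  | [] => []
  | s :: r => (if pvStart s > l then [[("start", l), ("end", pvStart s)]] else []) ++ gaps (max l (pvEnd s)) r

def lastMax (l : Int) : List (List (String × Int)) → Int
  | [] => l
  | s :: r => lastMax (max l (pvEnd s)) r

theorem afold_eq (segs : List (List (String × Int))) :
    ∀ (nad : List (List (String × Int))) (l : Int),
      segs.foldl aStep (nad, l) = (nad ++ gaps l segs, lastMax l segs) := by
  induction segs with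
  | nil => intro nad l; simp [gaps, lastMax]
  | cons s r ih =>
      intro nad l
      simp only [List.foldl_cons, aStep, gaps, lastMax]
      rw [ih]
      by_cases h : pvStart s > l <;> simp [h]

-- proof-side recursions for B's complement pass over merged intervals
def gapsP (l : Int) : List (Int × Int) → List (List (String × Int))
  | [] => []
  | p :: r => (if p.1 > l then [[("start", l), ("end", p.1)]] else []) ++ gapsP (max l p.2) r

def lastMaxP (l : Int) : List (Int × Int) → Int
  | [] => l
  | p :: r => lastMaxP (max l p.2) r

theorem cfold_eq (M : List (Int × Int)) :
    ∀ (nad : List (List (String × Int))) (l : Int),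
      M.foldl complStep (nad, l) = (nad ++ gapsP l M, lastMaxP l M) := by
  induction M with
  | nil => intro nad l; simp [gapsP, lastMaxP]
  | cons p r ih =>
      intro nad l
      simp only [List.foldl_cons, complStep, gapsP, lastMaxP]
      rw [ih]
      by_cases h : p.1 > l <;> simp [h]

-- proof-side recursion for B's merge with an explicit open interval
def mGo (cur : Int × Int) : List (List (String × Int)) → List (Int × Int)
  | [] => [cur]
  | s :: r =>
      if pvStart s ≤ cur.2 then mGo (cur.1, max cur.2 (pvEnd s)) r
      else cur :: mGo (pvStart s, pvEnd s) r

theorem mfold_eq (segs : List (List (String × Int))) :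
    ∀ (acc : List (Int × Int)) (cur : Int × Int),
      segs.foldl mergeStep (acc ++ [cur]) = acc ++ mGo cur segs := by
  induction segs with
  | nil => intro acc cur; simp [mGo]
  | cons s r ih =>
      intro acc cur
      have hms : mergeStep (acc ++ [cur]) s =
          if pvStart s ≤ cur.2 then acc ++ [(cur.1, max cur.2 (pvEnd s))]
          else (acc ++ [cur]) ++ [(pvStart s, pvEnd s)] := by
        simp [mergeStep]
      by_cases h : pvStart s ≤ cur.2
      · simp only [List.foldl_cons, hms, h, if_pos]
        rw [ih acc (cur.1, max cur.2 (pvEnd s))]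
        simp [mGo, h]
      · simp only [List.foldl_cons, hms, h, if_neg, not_false_iff]
        rw [ih (acc ++ [cur]) (pvStart s, pvEnd s)]
        simp [mGo, h]

-- the merged intervals carry the same gap structure and final bound as the raw sweep
theorem gapsP_mGo (segs : List (List (String × Int))) :
    ∀ (cur : Int × Int) (l : Int),
      gapsP l (mGo cur segs)
        = (if cur.1 > l then [[("start", l), ("end", cur.1)]] else []) ++ gaps (max l cur.2) segs := by
  induction segs with
  | nil => intro cur l; simp [mGo, gapsP, gaps]
  | cons s r ih =>
      intro cur l
      by_cases h : pvStart s ≤ cur.2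
      · have hng : ¬ pvStart s > max l cur.2 := by
          simp only [not_lt]; exact le_trans h (le_max_right _ _)
        simp only [mGo, h, if_pos, ih, gaps, hng, if_neg, not_false_iff]
        rw [max_assoc]; simp
      · simp only [mGo, h, if_neg, not_false_iff, gapsP, ih, gaps]
  
theorem lastMaxP_mGo (segs : List (List (String × Int))) :
    ∀ (cur : Int × Int) (l : Int),
      lastMaxP l (mGo cur segs) = lastMax (max l cur.2) segs := by
  induction segs with
  | nil => intro cur l; simp [mGo, lastMaxP, lastMax]
  | cons s r ih =>
      intro cur l
      by_cases h : pvStart s ≤ cur.2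
      · simp only [mGo, h, if_pos, ih, lastMax]
        rw [max_assoc]
      · simp only [mGo, h, if_neg, not_false_iff, lastMaxP, ih, lastMax]

theorem merge_sweep_eq (segs : List (List (String × Int))) :
    (segs.foldl mergeStep []).foldl complStep ([], 0) = segs.foldl aStep ([], 0) := by
  cases segs with
  | nil => simp
  | cons s r =>
      have h1 : (s :: r).foldl mergeStep [] = mGo (pvStart s, pvEnd s) r := by
        have : mergeStep [] s = [] ++ [(pvStart s, pvEnd s)] := by
          simp [mergeStep]
        simp only [List.foldl_cons, this]
        exact mfold_eq r [] (pvStart s, pvEnd s)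
      rw [h1, cfold_eq, gapsP_mGo, lastMaxP_mGo, afold_eq]
      simp [gaps, lastMax]

-- ===== VERDICT (by name: the statement is the Claim_ definition above) =====
theorem vad2nad_spec : Claim_equal_vad2nad := by
  intro vad total_length _ _
  unfold Spec_vad2nad vad2nad vad2nad_alt
  dsimp only
  rw [merge_sweep_eq]
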